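/- GENERATED by mk_final_copies.py from the proof of the farm's unit `decode_residue.11` (farm:decode_residue.11.2: Proof.lean) as the
   re-elaboration sweep compiled it — do not edit. -/
import Asan.CheckWalk
import Vorbis.Spec.Units.decode_residue_11
import Vorbis.Spec.Worked.decode_residue_11_Lemmas

open X86 X86.User Asan Vorbis Vorbis.Spec Vorbis.Spec.DecodeResidue

set_option maxRecDepth 4000
set_option maxHeartbeats 4000000

namespace Vorbis.Spec.decode_residue_11

/-- **`done:` (0x10fa53 … the `ret` at 0x10fa8c; C lines 2310–2311), assertion `At32`.** One walk to the call of
`arena_temp_restore(f, temp_alloc_point)` (its precondition: the busy arena `A'` with the one temp block as `dead`, `p = tap = L`),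
then — after the saved registers, the frame's granule index and the return address have been read through the callee's
footprint — a second walk over the epilogue's two shadow stores, `lea rsp,[rbp-0x28]`, the six pops and the `ret`. The function's
postcondition at the returned state is `post_ok` (Lemmas.lean).
NAMES: a fact about the segment's entry state `v` must NOT be called `w_…` (the walker clears those after its first step) nor
`s_…`; they are `hv_…` (registers) and `sl_…` (stack slots) here. -/
theorem done_ok {Lay : Layout} (hLay : Lay.hi = 0x1000000) {μ : Microarch} (hμ : UserX.MicroOK μ) {u₀ : State}
    (hcode : HasCodeNat Lay u₀ Vorbis.L.decode_residue.entry Vorbis.Code.code_decode_residue.nat Vorbis.L.decode_residue.size)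
    (h_atr : ∀ (others : List Obj) (frames : List (Nat × FrameLayout)) (A : Arena) (dead keep : List (Nat × Nat)),
      Calls Lay μ Vorbis.WayInv (Vorbis.conv u₀) Vorbis.L.arena_temp_restore.entry
        (Vorbis.Spec.arena_temp_restore.spec others frames A dead keep))
    (g : G) (hent : Entered u₀ g) (v : State) (hat : At32 u₀ g v) :
    ReachVia Lay μ WayInv v (Returned (conv u₀) g.spec g.e g.ret) := by
  have he := hent.entry
  v_entry he
  obtain ⟨w_rip, c, hv_r15⟩ := hat
  have hv_rbp := c.rbp
  have hv_rsp := c.rsp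
  have w_eq : Mem.EqOn Vorbis.L.textLo Vorbis.L.textHi u₀.mem v.mem := c.code
  have hdf : v.flags .df = false := (show abiInv _ from c.inv).1
  have hmx : v.mxcsr &&& 0x1F80 = 0x1F80 := (show abiInv _ from c.inv).2
  have hsse := Vorbis.sseOK_of_abiInv c.inv
  have sl_f := c.fr_f
  obtain ⟨⟨hf1, hf2, hf3⟩, hA1, hA2, hA3, hA4, hA5⟩ := places hent c
  obtain ⟨hg1, hg2, hg3, hg4⟩ := ghosts hent c
  -- the callee's contract, for the live lists inside the function, the busy arena, and the one temp block as `dead`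
  have hcall := h_atr g.others' g.frames' g.A' [(g.A'.T, g.sz)] []
  -- 0x10fa53 `mov esi,r15d` ; 0x10fa56 `mov rdi,[rbp-0xb0]` ; 0x10fa5d `call arena_temp_restore` (C line 2310)
  u_walk hcode [hμ.vendor] span [Vorbis.L.textLo, Vorbis.L.textHi] side (v_side)
  · -- call_inv
    v_inv
  · -- pre_10fa5d: the precondition of arena_temp_restore
    have hb : ADOBusy g.A' g.others' v.mem g.f g.sz := c.point.busy
    have hsf : (Vorbis.Block.mk g.f Off.sizeof.stb_vorbis).Same v.mem s_10fa5d.mem := by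
      simp only [vblock, voff]
      show Mem.EqOn (g.e.reg .rdi).toNat ((g.e.reg .rdi).toNat + 1808) v.mem s_10fa5d.mem
      u_memnorm
      u_eqon
    have hrsi : (s_10fa5d.reg .rsi).toNat % 2 ^ 32 = g.tap := by
      rw [w_rsi]
      exact tap_arg hA4
    refine ⟨⟨⟨?_, hent.offText'⟩, ?_, ?_, hent.pre.arenaText⟩, hg1, ?_, ?_⟩
    · have e : (s_10fa5d.reg .rsp).toNat + 8 = g.RA - 248 := by
        rw [w_rsp]
        unfold G.RA
        u_omega
      rw [e]
      exact c.shadow.untouched (by v_untouched)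
    · rw [w_rdi]
      exact c.point.env.live _ hent.vorbis.obj
    · have hfw : g.f + Off.sizeof.stb_vorbis ≤ 2 ^ 64 := by
        simp only [voff]
        show (g.e.reg .rdi).toNat + 1808 ≤ 2 ^ 64
        omega
      rw [w_rdi]
      exact hb.ok.frame_obj hfw hsf
    · rw [hrsi]
      exact hg2
    · -- `*f` (a setup block of the arena) does not meet the released range `[B + T', B + tap)`
      rw [hrsi, w_rdi]
      exact f_apart_released hent c g.tap
  · -- 0x10fa62 (cut33): the callee has returned
    v_after_call w_rsp_10fa5d w_mem_10fa5d
    have hrsi : (s_10fa5d.reg .rsi).toNat % 2 ^ 32 = g.tap := by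
      rw [w_rsi_10fa5d]
      exact tap_arg hA4
    -- the callee's post, for the entry's ghosts
    obtain ⟨hpa, hps⟩ := w_post
    rw [hrsi, hg3, hg4, w_rdi_10fa5d] at hpa
    rw [hg4, w_rsp_10fa5d] at hps
    -- the callee's footprint as numbers
    have eB : g.A'.B = g.A.B := rfl
    have etap : g.tap = g.A.L := rfl
    simp only [w_rdi_10fa5d, hrsi, etap, eB, shadowSpan] at w_same
    obtain ⟨T', hT'⟩ : ∃ T', g.A'.T = T' := ⟨_, rfl⟩
    rw [hT'] at w_same hA1 hA2
    -- the granule index of the frame, `si = (RA - 152) / 8`, with the bounds `u_omega` needs to tell a shadow address from a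
    -- stack slot (`si * 8 = rsp - 152` alone is not enough for `omega` on a disjunctive goal)
    have hsi8 : (g.RA - 152) / 8 * 8 = (g.e.reg .rsp).toNat - 152 := by
      unfold G.RA
      omega
    have hsib : 0xE0000 ≤ (g.RA - 152) / 8 ∧ (g.RA - 152) / 8 < 0x100000 := by
      unfold G.RA
      omega
    have sl_si0 := c.fr_si
    obtain ⟨si, hsi⟩ : ∃ si, (g.RA - 152) / 8 = si := ⟨_, rfl⟩
    rw [hsi] at sl_si0 hsi8 hsib
    -- the stack slots, through the callee's footprint
    have sl_si : s_10fa5dr.mem.readLE (g.e.reg .rsp - 240) 8 = si := by u_frame sl_si0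
    have sl_rbx : UInt64.ofNat (s_10fa5dr.mem.readLE (g.e.reg .rsp - 48) 8) = g.e.reg .rbx := by u_frame c.s_rbx
    have sl_r12 : UInt64.ofNat (s_10fa5dr.mem.readLE (g.e.reg .rsp - 40) 8) = g.e.reg .r12 := by u_frame c.s_r12
    have sl_r13 : UInt64.ofNat (s_10fa5dr.mem.readLE (g.e.reg .rsp - 32) 8) = g.e.reg .r13 := by u_frame c.s_r13
    have sl_r14 : UInt64.ofNat (s_10fa5dr.mem.readLE (g.e.reg .rsp - 24) 8) = g.e.reg .r14 := by u_frame c.s_r14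
    have sl_r15 : UInt64.ofNat (s_10fa5dr.mem.readLE (g.e.reg .rsp - 16) 8) = g.e.reg .r15 := by u_frame c.s_r15
    have sl_rbp : UInt64.ofNat (s_10fa5dr.mem.readLE (g.e.reg .rsp - 8) 8) = g.e.reg .rbp := by u_frame c.s_rbp
    have sl_ret0 : UInt64.ofNat (v.mem.readLE (g.e.reg .rsp) 8) = g.ret := by
      rw [c.same.readLE (g.e.reg .rsp) 8 (by omega) ?_]
      · exact he_retAddr
      · intro w hw
        have := hent.footprint_stack w hw
        unfold G.RA at this
        omega
    have sl_ret : UInt64.ofNat (s_10fa5dr.mem.readLE (g.e.reg .rsp) 8) = g.ret := by u_frame sl_ret0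
    -- the footprint of this segment so far
    have hsame : Mem.SameExcept [⟨(g.e.reg .rsp).toNat - 848, (g.e.reg .rsp).toNat⟩,
        ⟨(g.e.reg .rdi).toNat + 132, (g.e.reg .rdi).toNat + 136⟩,
        ⟨12582912 + (g.A.B + T') / 8, 12582912 + (g.A.B + g.A.L + 7) / 8⟩,
        ⟨12582912 + si, 12582912 + si + 12⟩] v.mem s_10fa5dr.mem := by
      u_same
    -- 0x10fa62 `mov rax,[rbp-0xe8]` ; 0x10fa69, 0x10fa74 the two shadow stores ; 0x10fa7e `lea rsp,[rbp-0x28]` ; six pops ; `ret`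
    u_walk hcode [hμ.vendor] span [Vorbis.L.textLo, Vorbis.L.textHi] side (v_side)
    -- after the `ret` at 0x10fa8c (C line 2311): the function's `Returned`
    have hfin : Mem.SameExcept [⟨(g.e.reg .rsp).toNat - 848, (g.e.reg .rsp).toNat⟩,
        ⟨(g.e.reg .rdi).toNat + 132, (g.e.reg .rdi).toNat + 136⟩,
        ⟨12582912 + (g.A.B + T') / 8, 12582912 + (g.A.B + g.A.L + 7) / 8⟩,
        ⟨12582912 + si, 12582912 + si + 12⟩] v.mem s_10fa8c.mem := by
      u_same
    obtain ⟨hfoot, hpost⟩ := post_ok hent c w_mem w_rsp hfin hpa hps hT' hsi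
    refine ReachVia.done ?_
    refine X86.User.Returned.mk w_rip w_rsp ?r_saved hfoot (Vorbis.conv_code_in w_eq) ?r_inv hpost
    case r_saved =>
      intro r hr
      cases r <;> first
        | exact absurd hr (by decide)
        | (with_reducible assumption)
    case r_inv => v_inv

/-- **The trampoline at 0x10fafc** (`mov r15d, DWORD PTR [rbp-0xec] ; jmp 10fa53`, assertion `At36`): reloads
`temp_alloc_point` into r15d and reaches `done:` with `At32`; the rest is `done_ok`. -/
theorem tramp36_ok {Lay : Layout} (hLay : Lay.hi = 0x1000000) {μ : Microarch} (hμ : UserX.MicroOK μ) {u₀ : State} {g : G}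
    (hcode : HasCodeNat Lay u₀ Vorbis.L.decode_residue.entry Vorbis.Code.code_decode_residue.nat Vorbis.L.decode_residue.size)
    (hdone : ∀ v, At32 u₀ g v → ReachVia Lay μ WayInv v (Returned (conv u₀) g.spec g.e g.ret))
    (hent : Entered u₀ g) (v : State) (hat : At36 u₀ g v) :
    ReachVia Lay μ WayInv v (Returned (conv u₀) g.spec g.e g.ret) := by
  have he := hent.entry
  v_entry he
  obtain ⟨w_rip, c, sl_tap⟩ := hat
  have hv_rbp := c.rbp
  have hv_rsp := c.rsp
  have w_eq : Mem.EqOn Vorbis.L.textLo Vorbis.L.textHi u₀.mem v.mem := c.code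
  have hdf : v.flags .df = false := (show abiInv _ from c.inv).1
  have hmx : v.mxcsr &&& 0x1F80 = 0x1F80 := (show abiInv _ from c.inv).2
  have hsse := Vorbis.sseOK_of_abiInv c.inv
  -- 0x10fafc: the load of the slot `e.rsp - 244`, the jump
  u_walk hcode [hμ.vendor] until [Vorbis.L.decode_residue.cut32] span [Vorbis.L.textLo, Vorbis.L.textHi] side (v_side)
  -- 0x10fa53 `done:`
  exact hdone s_10fb03 (at32_of_tramp hent c w_rip w_mem w_kept w_r15 w_flags w_mxcsr)

/-- **The trampoline at 0x10fb08** (`mov r15d, DWORD PTR [rbp-0xdc] ; jmp 10fa53`, assertion `At37`): reloads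
`temp_alloc_point` into r15d and reaches `done:` with `At32`; the rest is `done_ok`. -/
theorem tramp37_ok {Lay : Layout} (hLay : Lay.hi = 0x1000000) {μ : Microarch} (hμ : UserX.MicroOK μ) {u₀ : State} {g : G}
    (hcode : HasCodeNat Lay u₀ Vorbis.L.decode_residue.entry Vorbis.Code.code_decode_residue.nat Vorbis.L.decode_residue.size)
    (hdone : ∀ v, At32 u₀ g v → ReachVia Lay μ WayInv v (Returned (conv u₀) g.spec g.e g.ret))
    (hent : Entered u₀ g) (v : State) (hat : At37 u₀ g v) :
    ReachVia Lay μ WayInv v (Returned (conv u₀) g.spec g.e g.ret) := by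
  have he := hent.entry
  v_entry he
  obtain ⟨w_rip, c, sl_tap⟩ := hat
  have hv_rbp := c.rbp
  have hv_rsp := c.rsp
  have w_eq : Mem.EqOn Vorbis.L.textLo Vorbis.L.textHi u₀.mem v.mem := c.code
  have hdf : v.flags .df = false := (show abiInv _ from c.inv).1
  have hmx : v.mxcsr &&& 0x1F80 = 0x1F80 := (show abiInv _ from c.inv).2
  have hsse := Vorbis.sseOK_of_abiInv c.inv
  -- 0x10fb08: the load of the slot `e.rsp - 228`, the jump
  u_walk hcode [hμ.vendor] until [Vorbis.L.decode_residue.cut32] span [Vorbis.L.textLo, Vorbis.L.textHi] side (v_side)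
  -- 0x10fa53 `done:`
  exact hdone s_10fb0f (at32_of_tramp hent c w_rip w_mem w_kept w_r15 w_flags w_mxcsr)

/-- **The trampoline at 0x10fb14** (`mov r15d, DWORD PTR [rbp-0xdc] ; jmp 10fa53`, assertion `At38`): reloads
`temp_alloc_point` into r15d and reaches `done:` with `At32`; the rest is `done_ok`. -/
theorem tramp38_ok {Lay : Layout} (hLay : Lay.hi = 0x1000000) {μ : Microarch} (hμ : UserX.MicroOK μ) {u₀ : State} {g : G}
    (hcode : HasCodeNat Lay u₀ Vorbis.L.decode_residue.entry Vorbis.Code.code_decode_residue.nat Vorbis.L.decode_residue.size)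
    (hdone : ∀ v, At32 u₀ g v → ReachVia Lay μ WayInv v (Returned (conv u₀) g.spec g.e g.ret))
    (hent : Entered u₀ g) (v : State) (hat : At38 u₀ g v) :
    ReachVia Lay μ WayInv v (Returned (conv u₀) g.spec g.e g.ret) := by
  have he := hent.entry
  v_entry he
  obtain ⟨w_rip, c, sl_tap⟩ := hat
  have hv_rbp := c.rbp
  have hv_rsp := c.rsp
  have w_eq : Mem.EqOn Vorbis.L.textLo Vorbis.L.textHi u₀.mem v.mem := c.code
  have hdf : v.flags .df = false := (show abiInv _ from c.inv).1
  have hmx : v.mxcsr &&& 0x1F80 = 0x1F80 := (show abiInv _ from c.inv).2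
  have hsse := Vorbis.sseOK_of_abiInv c.inv
  -- 0x10fb14: the load of the slot `e.rsp - 228`, the jump
  u_walk hcode [hμ.vendor] until [Vorbis.L.decode_residue.cut32] span [Vorbis.L.textLo, Vorbis.L.textHi] side (v_side)
  -- 0x10fa53 `done:`
  exact hdone s_10fb1b (at32_of_tramp hent c w_rip w_mem w_kept w_r15 w_flags w_mxcsr)

/-- **The trampoline at 0x10fb20** (`mov r15d, DWORD PTR [rbp-0xec] ; jmp 10fa53`, assertion `At39`): reloads
`temp_alloc_point` into r15d and reaches `done:` with `At32`; the rest is `done_ok`. -/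
theorem tramp39_ok {Lay : Layout} (hLay : Lay.hi = 0x1000000) {μ : Microarch} (hμ : UserX.MicroOK μ) {u₀ : State} {g : G}
    (hcode : HasCodeNat Lay u₀ Vorbis.L.decode_residue.entry Vorbis.Code.code_decode_residue.nat Vorbis.L.decode_residue.size)
    (hdone : ∀ v, At32 u₀ g v → ReachVia Lay μ WayInv v (Returned (conv u₀) g.spec g.e g.ret))
    (hent : Entered u₀ g) (v : State) (hat : At39 u₀ g v) :
    ReachVia Lay μ WayInv v (Returned (conv u₀) g.spec g.e g.ret) := by
  have he := hent.entry
  v_entry he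
  obtain ⟨w_rip, c, sl_tap⟩ := hat
  have hv_rbp := c.rbp
  have hv_rsp := c.rsp
  have w_eq : Mem.EqOn Vorbis.L.textLo Vorbis.L.textHi u₀.mem v.mem := c.code
  have hdf : v.flags .df = false := (show abiInv _ from c.inv).1
  have hmx : v.mxcsr &&& 0x1F80 = 0x1F80 := (show abiInv _ from c.inv).2
  have hsse := Vorbis.sseOK_of_abiInv c.inv
  -- 0x10fb20: the load of the slot `e.rsp - 244`, the jump
  u_walk hcode [hμ.vendor] until [Vorbis.L.decode_residue.cut32] span [Vorbis.L.textLo, Vorbis.L.textHi] side (v_side)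
  -- 0x10fa53 `done:`
  exact hdone s_10fb27 (at32_of_tramp hent c w_rip w_mem w_kept w_r15 w_flags w_mxcsr)

end Vorbis.Spec.decode_residue_11

/-- Segment 11 of `decode_residue` (`done:` 0x10fa53 … `ret` 0x10fa8c, and the four trampolines 0x10fafc … 0x10fb27; C lines
2303–2311): from each of the five entry assertions to the function's `Returned`. -/
theorem Vorbis.Spec.Worked.decode_residue_11_ok : Vorbis.Spec.decode_residue_11.Statement := by
  unfold Vorbis.Spec.decode_residue_11.Statement
  intro Lay hLay μ hμ u₀ hcode h_atr
  intro g hent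
  have hdone := Vorbis.Spec.decode_residue_11.done_ok hLay hμ hcode h_atr g hent
  refine ⟨hdone, ?_, ?_, ?_, ?_⟩
  · exact Vorbis.Spec.decode_residue_11.tramp36_ok hLay hμ hcode hdone hent
  · exact Vorbis.Spec.decode_residue_11.tramp37_ok hLay hμ hcode hdone hent
  · exact Vorbis.Spec.decode_residue_11.tramp38_ok hLay hμ hcode hdone hent
  · exact Vorbis.Spec.decode_residue_11.tramp39_ok hLay hμ hcode hdone hent
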